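-- pv_equiv track=rewrite | github.com/Skuzzzy/content-aware-scale | test.py | seam_search_vertical
-- ===== SOURCE A (Python) =====
-- def seam_search_vertical(partial_grid):
--
--     width = len(partial_grid[0])
--     height = len(partial_grid)
--     cost_grid = [[None for _ in range(width)] for _ in range(height)]
--     direction_grid = [[0 for _ in range(width)] for _ in range(height)]
--
--     # Populate first row
--     for x in range(width):
--         y = 0
--         cost_grid[y][x] = partial_grid[y][x]
--         direction_grid[y][x] = 0 # END OF PATH
--
--     for y in range(1, height):
--         for x in range(width):
--             if x == 0:
--                 min_parent = 2
--                 min_cost = cost_grid[y-1][x]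
--                 if cost_grid[y-1][x+1] < min_cost:
--                     min_parent = 3
--                     min_cost = cost_grid[y-1][x+1]
--             elif x == width - 1:
--                 min_parent = 1
--                 min_cost = cost_grid[y-1][x-1]
--                 if cost_grid[y-1][x] < min_cost:
--                     min_parent = 2
--                     min_cost = cost_grid[y-1][x]
--             else:
--                 min_parent = 1
--                 min_cost = cost_grid[y-1][x-1]
--                 if cost_grid[y-1][x] < min_cost:
--                     min_parent = 2
--                     min_cost = cost_grid[y-1][x]
--                 if cost_grid[y-1][x+1] < min_cost:
--                     min_parent = 3
--                     min_cost = cost_grid[y-1][x+1]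
--
--             cost_grid[y][x] = partial_grid[y][x] + min_cost
--             direction_grid[y][x] = min_parent
--
--     return cost_grid, direction_grid
-- ===== SOURCE B (Python) =====
-- def seam_search_vertical(partial_grid):
--     width = len(partial_grid[0])
--     height = len(partial_grid)
--
--     # Pass 1: cost rows only -- each cell adds the min of the clamped 3-cell
--     # window of the previous cost row; no argmin bookkeeping here.
--     cost_grid = [list(partial_grid[0])]
--     for y in range(1, height):
--         prev = cost_grid[-1]
--         cost_grid.append([partial_grid[y][x] + min(prev[max(0, x - 1):x + 2])
--                           for x in range(width)])
--
--     # Pass 2: reconstruct directions from the finished cost grid -- the parent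
--     # cost is cost_grid[y][x] - partial_grid[y][x]; the first parent column
--     # (left, straight, right) whose cost equals it is the one A recorded.
--     direction_grid = [[0] * width]
--     for y in range(1, height):
--         prev, base = cost_grid[y - 1], cost_grid[y]
--         drow = []
--         for x in range(width):
--             m = base[x] - partial_grid[y][x]
--             if x > 0 and prev[x - 1] == m:
--                 drow.append(1)
--             elif prev[x] == m:
--                 drow.append(2)
--             else:
--                 drow.append(3)
--         direction_grid.append(drow)
--     return cost_grid, direction_grid
-- ===== Notes on version B (the rewrite author's own statement) =====
-- stated objective: alternative
-- what changed: A fills cost and direction together, running the three-way boundary/argmin branch at every cell of pre-allocated mutable grids; B splits the work into two staged passes: pass 1 builds only the cost rows (each cell adds min over a clamped slice of the previous row), and pass 2 reconstructs the direction grid afterwards from the finished cost grid by recovering the parent cost (cost[y][x] - partial[y][x]) and taking the first parent column (left, straight, right) whose cost equals it, which matches A's tie order.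
import Mathlib
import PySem

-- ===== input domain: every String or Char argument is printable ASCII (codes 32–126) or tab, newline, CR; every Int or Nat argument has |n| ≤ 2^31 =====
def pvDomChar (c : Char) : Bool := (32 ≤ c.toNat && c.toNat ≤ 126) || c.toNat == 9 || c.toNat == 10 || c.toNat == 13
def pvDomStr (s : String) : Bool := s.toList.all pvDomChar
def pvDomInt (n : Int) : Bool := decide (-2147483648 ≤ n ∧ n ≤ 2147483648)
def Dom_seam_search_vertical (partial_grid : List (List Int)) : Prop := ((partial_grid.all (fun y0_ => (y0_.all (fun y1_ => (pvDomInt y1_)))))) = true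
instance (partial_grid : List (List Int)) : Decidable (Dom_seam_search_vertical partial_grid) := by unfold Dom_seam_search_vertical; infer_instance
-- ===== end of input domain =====

-- B replaces A's interleaved cost+direction fill (three-way boundary branch per cell on
-- pre-allocated mutable grids) by two staged passes: cost rows first (min over a clamped
-- slice of the previous row), then the direction grid reconstructed from the finished cost
-- grid; objective: alternative. Equivalence is about the return value (no argument mutation).

-- ===== PORT A =====
-- grid read/write helpers: g[y][x] and g[y][x] = v (indices here are always nonnegative;
-- inside Pre_ every index A uses is in range, so getD's default is never read)
def pvGet2 (g : List (List Int)) (y x : Nat) : Int := (g.getD y []).getD x 0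
def pvSet2 (g : List (List Int)) (y x : Nat) (v : Int) : List (List Int) :=
  g.set y ((g.getD y []).set x v)

-- A's three-way branch computing (min_parent, min_cost) from cost_grid row y-1
def aBranch (c : List (List Int)) (width y x : Nat) : Int × Int :=
  if x = 0 then
    if pvGet2 c (y-1) (x+1) < pvGet2 c (y-1) x then (3, pvGet2 c (y-1) (x+1))
    else (2, pvGet2 c (y-1) x)
  else if x = width - 1 then
    if pvGet2 c (y-1) x < pvGet2 c (y-1) (x-1) then (2, pvGet2 c (y-1) x)
    else (1, pvGet2 c (y-1) (x-1))
  else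
    let s := if pvGet2 c (y-1) x < pvGet2 c (y-1) (x-1) then ((2:Int), pvGet2 c (y-1) x)
             else (1, pvGet2 c (y-1) (x-1))
    if pvGet2 c (y-1) (x+1) < s.2 then (3, pvGet2 c (y-1) (x+1)) else s

def seam_search_vertical (partial_grid : List (List Int)) : List (List Int) × List (List Int) :=
  let width := (partial_grid.getD 0 []).length
  let height := partial_grid.length
  -- cost_grid's None placeholders are represented by 0: inside Pre_ every cell is
  -- overwritten before the grids are returned and no placeholder is ever read
  let cost_grid := List.replicate height (List.replicate width (0:Int))
  let direction_grid := List.replicate height (List.replicate width (0:Int))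
  let s1 := (List.range width).foldl
      (fun (s : List (List Int) × List (List Int)) x =>
        (pvSet2 s.1 0 x (pvGet2 partial_grid 0 x), pvSet2 s.2 0 x 0)) (cost_grid, direction_grid)
  (List.range' 1 (height - 1)).foldl
    (fun s y =>
      (List.range width).foldl
        (fun (s : List (List Int) × List (List Int)) x =>
          (pvSet2 s.1 y x (pvGet2 partial_grid y x + (aBranch s.1 width y x).2),
           pvSet2 s.2 y x (aBranch s.1 width y x).1)) s) s1

-- ===== PORT B =====
-- min(prev[max(0, x-1) : x+2]) — Python slice + min (inside Pre_ the slice is nonempty)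
def pvWin (prev : List Int) (x : Nat) : Int :=
  (PySem.List.min? (PySem.List.slice prev (some (max 0 ((x:Int) - 1))) (some ((x:Int) + 2)))
    (fun v => v)).getD 0

def seam_search_vertical_alt (partial_grid : List (List Int)) : List (List Int) × List (List Int) :=
  let width := (partial_grid.getD 0 []).length
  let height := partial_grid.length
  -- Pass 1: cost rows only
  let cost_grid := (List.range' 1 (height - 1)).foldl
    (fun (cg : List (List Int)) y =>
      let prev := cg.getLast?.getD []
      cg ++ [(List.range width).map
        (fun x => (partial_grid.getD y []).getD x 0 + pvWin prev x)])
    [partial_grid.getD 0 []]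
  -- Pass 2: directions reconstructed from the finished cost grid
  let direction_grid := (List.range' 1 (height - 1)).foldl
    (fun (dg : List (List Int)) y =>
      let prev := cost_grid.getD (y - 1) []
      let base := cost_grid.getD y []
      let drow := (List.range width).foldl
        (fun (dr : List Int) x =>
          let m := base.getD x 0 - (partial_grid.getD y []).getD x 0
          dr ++ [if 0 < x ∧ prev.getD (x - 1) 0 = m then (1:Int)
                 else if prev.getD x 0 = m then 2 else 3]) []
      dg ++ [drow])
    [List.replicate width (0:Int)]
  (cost_grid, direction_grid)

-- ===== PRECONDITION & SPEC =====
-- Pre_ = exactly the inputs where Python A returns: a nonempty grid, no row shorter than the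
-- first (A indexes partial_grid[y][x] for x < width), and, unless there is only one row,
-- width ≠ 1 (A's x == 0 branch always reads cost_grid[y-1][x+1], an IndexError at width 1)
def Pre_seam_search_vertical (partial_grid : List (List Int)) : Prop :=
  partial_grid ≠ [] ∧
  (∀ r ∈ partial_grid, (partial_grid.headD []).length ≤ r.length) ∧
  (partial_grid.length = 1 ∨ (partial_grid.headD []).length ≠ 1)
instance (partial_grid : List (List Int)) : Decidable (Pre_seam_search_vertical partial_grid) := by
  unfold Pre_seam_search_vertical; infer_instance

def pvWitness_seam_search_vertical : List (List Int) := [[1, 2], [3, 4], [5, 6]]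

def Spec_seam_search_vertical (partial_grid : List (List Int)) (out : List (List Int) × List (List Int)) : Prop := out = seam_search_vertical_alt partial_grid
instance (partial_grid : List (List Int)) (out : List (List Int) × List (List Int)) : Decidable (Spec_seam_search_vertical partial_grid out) := by unfold Spec_seam_search_vertical; infer_instance

-- ===== CLAIM (what is proved, stated in full; the proofs are below) =====
def Claim_equal_seam_search_vertical : Prop := ∀ (partial_grid : List (List Int)), Dom_seam_search_vertical partial_grid → Pre_seam_search_vertical partial_grid → Spec_seam_search_vertical partial_grid (seam_search_vertical partial_grid)

-- ===== LEMMAS AND PROOFS =====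

-- A's branch read through prev = row y-1 of the cost grid
def fA (prev : List Int) (width x : Nat) : Int × Int :=
  if x = 0 then
    if prev.getD (x+1) 0 < prev.getD x 0 then (3, prev.getD (x+1) 0)
    else (2, prev.getD x 0)
  else if x = width - 1 then
    if prev.getD x 0 < prev.getD (x-1) 0 then (2, prev.getD x 0)
    else (1, prev.getD (x-1) 0)
  else
    let s := if prev.getD x 0 < prev.getD (x-1) 0 then ((2:Int), prev.getD x 0)
             else (1, prev.getD (x-1) 0)
    if prev.getD (x+1) 0 < s.2 then (3, prev.getD (x+1) 0) else s

theorem aBranch_eq_fA (c : List (List Int)) (width y x : Nat) :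
    aBranch c width y x = fA (c.getD (y-1) []) width x := rfl

-- the shared functional description of the DP rows below the first
def cRowS (width : Nat) (prev row : List Int) : List Int :=
  (List.range width).map (fun x => row.getD x 0 + (fA prev width x).2)
def dRowS (width : Nat) (prev : List Int) : List Int :=
  (List.range width).map (fun x => (fA prev width x).1)
def specRows (width : Nat) (prev : List Int) : List (List Int) → List (List Int) × List (List Int)
  | [] => ([], [])
  | row :: rs =>
    let c := cRowS width prev row
    let rest := specRows width c rs
    (c :: rest.1, dRowS width prev :: rest.2)

-- l.drop i, i in range, as a cons
theorem drop_cons_getD (l : List Int) (i : Nat) (h : i < l.length) :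
    l.drop i = l.getD i 0 :: l.drop (i+1) := by
  rw [List.drop_eq_getElem_cons h, List.getD_eq_getElem?_getD, List.getElem?_eq_getElem h]
  rfl

-- B's window min equals the cost component of A's branch
set_option maxRecDepth 8192 in
theorem pvWin_eq_fA (prev : List Int) (width x : Nat) (hx : x < width) (hw : width ≠ 1)
    (hlen : prev.length = width) : pvWin prev x = (fA prev width x).2 := by
  have hw2 : 2 ≤ width := by omega
  by_cases hx0 : x = 0
  · subst hx0
    have h0 : max 0 ((0:Nat) - 1 : Int) = ((0:Nat) : Int) := by norm_num
    have h2 : ((0:Nat):Int) + 2 = ((2:Nat) : Int) := by norm_num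
    unfold pvWin
    rw [h0, h2, PySem.List.slice_natCast]
    have htake : (prev.drop 0).take (2 - 0) = [prev.getD 0 0, prev.getD 1 0] := by
      rw [List.drop_zero]
      rw [show prev = prev.drop 0 from rfl, drop_cons_getD _ 0 (by omega),
        drop_cons_getD _ 1 (by omega)]
      simp
    rw [htake, PySem.List.min?_id_cons]
    simp only [List.foldl_cons, List.foldl_nil, Option.getD_some]
    simp only [fA, Nat.zero_add, if_true]
    rw [min_def]; split_ifs <;> first | rfl | omega
  · have h1 : 1 ≤ x := by omega
    have hlo : max 0 ((x:Nat) - 1 : Int) = ((x - 1 : Nat) : Int) := by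
      push_cast [h1]; omega
    have hhi : ((x:Nat):Int) + 2 = ((x + 2 : Nat) : Int) := by push_cast; ring
    unfold pvWin
    rw [hlo, hhi, PySem.List.slice_natCast]
    have hcnt : x + 2 - (x - 1) = 3 := by omega
    by_cases hxl : x = width - 1
    · have htake : (prev.drop (x-1)).take (x + 2 - (x - 1))
          = [prev.getD (x-1) 0, prev.getD x 0] := by
        rw [hcnt, drop_cons_getD _ (x-1) (by omega),
          show x - 1 + 1 = x by omega, drop_cons_getD _ x (by omega),
          List.drop_eq_nil_of_le (by omega)]
        simp
      rw [htake, PySem.List.min?_id_cons]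
      simp only [List.foldl_cons, List.foldl_nil, Option.getD_some]
      simp only [fA, hx0, if_false, if_pos hxl]
      rw [min_def]; split_ifs <;> first | rfl | omega
    · have htake : (prev.drop (x-1)).take (x + 2 - (x - 1))
          = [prev.getD (x-1) 0, prev.getD x 0, prev.getD (x+1) 0] := by
        rw [hcnt, drop_cons_getD _ (x-1) (by omega),
          show x - 1 + 1 = x by omega, drop_cons_getD _ x (by omega),
          drop_cons_getD _ (x+1) (by omega)]
        simp
      rw [htake, PySem.List.min?_id_cons]
      simp only [List.foldl_cons, List.foldl_nil, Option.getD_some]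
      simp only [fA, hx0, if_false, if_neg hxl]
      simp only [min_def]
      split_ifs <;> first | rfl | omega

-- B's pass-2 equality test recovers the direction component of A's branch
theorem dirTest_eq_fA (prev : List Int) (width x : Nat) (hx : x < width) :
    (if 0 < x ∧ prev.getD (x-1) 0 = (fA prev width x).2 then (1:Int)
     else if prev.getD x 0 = (fA prev width x).2 then 2 else 3) = (fA prev width x).1 := by
  by_cases hx0 : x = 0
  · subst hx0
    simp only [fA, Nat.zero_add, if_true]
    split_ifs <;> first | rfl | omega
  · by_cases hxl : x = width - 1
    · simp only [fA, hx0, if_false, if_pos hxl]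
      split_ifs <;> first | rfl | omega
    · simp only [fA, hx0, if_false, if_neg hxl]
      split_ifs <;> first | rfl | omega

-- ---------- A-side: the mutable double-grid fill produces specRows ----------

-- writing into row y does not change any other row
theorem getD_set_ne (g : List (List Int)) (y y' : Nat) (r : List Int) (h : y' ≠ y) :
    (g.set y r).getD y' [] = g.getD y' [] := by
  simp [List.getD_eq_getElem?_getD, List.getElem?_set_ne (by omega : y ≠ y')]

theorem getD_set_self (g : List (List Int)) (y : Nat) (r : List Int) (h : y < g.length) :
    (g.set y r).getD y [] = r := by
  simp [List.getD_eq_getElem?_getD, List.getElem?_set_self h]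

theorem aBranch_setRow (c : List (List Int)) (width y x : Nat) (r : List Int) (hy : 1 ≤ y) :
    aBranch (c.set y r) width y x = aBranch c width y x := by
  rw [aBranch_eq_fA, aBranch_eq_fA, getD_set_ne c y (y - 1) r (by omega)]

-- one pass of the inner x-loop, for a generic pair of per-cell value functions that only
-- read rows other than y (covers A's first-row loop and its main inner loop)
theorem pairFold (y : Nat) (F G : List (List Int) → Nat → Int)
    (hF : ∀ c r x, F (c.set y r) x = F c x) (hG : ∀ c r x, G (c.set y r) x = G c x) :
    ∀ (k : Nat) (c d : List (List Int)), y < c.length → y < d.length →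
      k ≤ (c.getD y []).length → k ≤ (d.getD y []).length →
      (List.range k).foldl
          (fun (s : List (List Int) × List (List Int)) x =>
            (pvSet2 s.1 y x (F s.1 x), pvSet2 s.2 y x (G s.1 x))) (c, d)
        = (c.set y (((List.range k).map (F c)) ++ ((c.getD y []).drop k)),
           d.set y (((List.range k).map (G c)) ++ ((d.getD y []).drop k))) := by
  intro k
  induction k with
  | zero =>
    intro c d hc hd _ _
    have e1 : c.set y ((c.getD y []).drop 0) = c := by
      rw [List.drop_zero, List.getD_eq_getElem?_getD, List.getElem?_eq_getElem hc,
        Option.getD_some, List.set_getElem_self]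
    have e2 : d.set y ((d.getD y []).drop 0) = d := by
      rw [List.drop_zero, List.getD_eq_getElem?_getD, List.getElem?_eq_getElem hd,
        Option.getD_some, List.set_getElem_self]
    simp only [List.range_zero, List.map_nil, List.foldl_nil, List.nil_append]
    rw [e1, e2]
  | succ k ih =>
    intro c d hc hd hkc hkd
    have hkc' : k < (c.getD y []).length := by omega
    have hkd' : k < (d.getD y []).length := by omega
    rw [List.range_succ, List.foldl_append, ih c d hc hd (by omega) (by omega)]
    simp only [List.foldl_cons, List.foldl_nil]
    rw [hF, hG]
    unfold pvSet2
    rw [getD_set_self c y _ hc, getD_set_self d y _ hd, List.set_set, List.set_set]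
    have key : ∀ (row0 : List Int) (f : Nat → Int), k < row0.length →
        (((List.range k).map f) ++ row0.drop k).set k (f k)
          = ((List.range (k+1)).map f) ++ row0.drop (k+1) := by
      intro row0 f hk
      rw [List.set_append_right _ _ (by simp)]
      simp only [List.length_map, List.length_range, Nat.sub_self]
      rw [List.drop_eq_getElem_cons hk, List.set_cons_zero, List.range_succ, List.map_append]
      simp
    rw [key _ _ hkc', key _ _ hkd']
    simp [List.range_succ]

theorem outerA (P : List (List Int)) (width : Nat) :
    ∀ (n y0 : Nat) (c d : List (List Int)),
      1 ≤ y0 → y0 + n = P.length → c.length = P.length → d.length = P.length →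
      (∀ j, y0 ≤ j → j < P.length → c.getD j [] = List.replicate width 0) →
      (∀ j, y0 ≤ j → j < P.length → d.getD j [] = List.replicate width 0) →
      (List.range' y0 n).foldl
          (fun s y =>
            (List.range width).foldl
              (fun (s : List (List Int) × List (List Int)) x =>
                (pvSet2 s.1 y x (pvGet2 P y x + (aBranch s.1 width y x).2),
                 pvSet2 s.2 y x (aBranch s.1 width y x).1)) s) (c, d)
        = (c.take y0 ++ (specRows width (c.getD (y0-1) []) (P.drop y0)).1,
           d.take y0 ++ (specRows width (c.getD (y0-1) []) (P.drop y0)).2) := by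
  intro n
  induction n with
  | zero =>
    intro y0 c d hy0 hsum hc hd _ _
    have hdrop : P.drop y0 = [] := List.drop_eq_nil_of_le (by omega)
    have htake : c.take y0 = c := List.take_of_length_le (by omega)
    have htaked : d.take y0 = d := List.take_of_length_le (by omega)
    simp [hdrop, htake, htaked, specRows]
  | succ n ih =>
    intro y0 c d hy0 hsum hc hd hcrows hdrows
    have hy0P : y0 < P.length := by omega
    have hrow : c.getD y0 [] = List.replicate width 0 := hcrows y0 (le_refl _) hy0P
    have hrowd : d.getD y0 [] = List.replicate width 0 := hdrows y0 (le_refl _) hy0P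
    rw [List.range'_succ, List.foldl_cons]
    have hpf := pairFold y0
      (fun cc x => pvGet2 P y0 x + (aBranch cc width y0 x).2)
      (fun cc x => (aBranch cc width y0 x).1)
      (fun cc r xx => by simp only [aBranch_setRow cc width y0 xx r hy0])
      (fun cc r xx => by simp only [aBranch_setRow cc width y0 xx r hy0])
      width c d (by omega) (by omega)
      (le_of_eq (by rw [hrow]; simp)) (le_of_eq (by rw [hrowd]; simp))
    rw [hpf]
    have hdropz : ((c.getD y0 []).drop width) = [] := by
      rw [hrow]; simp
    have hdropzd : ((d.getD y0 []).drop width) = [] := by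
      rw [hrowd]; simp
    rw [hdropz, hdropzd, List.append_nil, List.append_nil]
    have hmapc : (List.range width).map (fun x => pvGet2 P y0 x + (aBranch c width y0 x).2)
        = cRowS width (c.getD (y0-1) []) (P.getD y0 []) := rfl
    have hmapd : (List.range width).map (fun x => (aBranch c width y0 x).1)
        = dRowS width (c.getD (y0-1) []) := rfl
    rw [hmapc, hmapd]
    rw [ih (y0+1) _ _ (by omega) (by omega) (by simpa using hc) (by simpa using hd)
      (by
        intro j hj hjP
        rw [getD_set_ne _ y0 j _ (by omega)]
        exact hcrows j (by omega) hjP)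
      (by
        intro j hj hjP
        rw [getD_set_ne _ y0 j _ (by omega)]
        exact hdrows j (by omega) hjP)]
    have htk : ∀ (g : List (List Int)) (r : List Int), g.length = P.length →
        (g.set y0 r).take (y0+1) = g.take y0 ++ [r] := by
      intro g r hg
      apply List.ext_getElem
      · simp only [List.length_take, List.length_set, List.length_append,
          List.length_singleton, hg]
        omega
      · intro i h1 h2
        by_cases hi : i = y0
        · subst hi
          rw [List.getElem_take, List.getElem_set_self (by simp [hg]; omega)]
          have hmin : (List.take i g).length = i := by simp [hg]; omega
          rw [List.getElem_append_right (by omega)]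
          simp [hmin]
        · have hi' : i < y0 := by
            simp only [List.length_take, List.length_set, hg] at h1
            omega
          rw [List.getElem_take, List.getElem_set_ne (by omega)]
          rw [List.getElem_append_left (by simp [hg]; omega)]
          simp [List.getElem_take]
    rw [htk c _ hc, htk d _ hd]
    have hmid : y0 + 1 - 1 = y0 := by omega
    rw [hmid, getD_set_self c y0 _ (by omega)]
    have hPdrop : P.drop y0 = P.getD y0 [] :: P.drop (y0+1) := by
      rw [List.drop_eq_getElem_cons hy0P, List.getD_eq_getElem?_getD,
        List.getElem?_eq_getElem hy0P]
      simp
    rw [hPdrop]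
    simp [specRows, List.append_assoc]

-- ---------- B-side: the two staged passes produce specRows ----------

theorem foldBCost (P : List (List Int)) (width : Nat) (hw : width ≠ 1) :
    ∀ (n y0 : Nat) (acc : List (List Int)) (prev : List Int),
      1 ≤ y0 → y0 + n = P.length →
      acc.getLast? = some prev → prev.length = width →
      (List.range' y0 n).foldl
        (fun (cg : List (List Int)) y =>
          let prev := cg.getLast?.getD []
          cg ++ [(List.range width).map
            (fun x => (P.getD y []).getD x 0 + pvWin prev x)]) acc
      = acc ++ (specRows width prev (P.drop y0)).1 := by
  intro n
  induction n with
  | zero =>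
    intro y0 acc prev hy0 hsum hlast hlen
    have hdrop : P.drop y0 = [] := List.drop_eq_nil_of_le (by omega)
    simp [hdrop, specRows]
  | succ n ih =>
    intro y0 acc prev hy0 hsum hlast hlen
    have hy0P : y0 < P.length := by omega
    rw [List.range'_succ, List.foldl_cons]
    simp only [hlast, Option.getD_some]
    have hmap : (List.range width).map (fun x => (P.getD y0 []).getD x 0 + pvWin prev x)
        = cRowS width prev (P.getD y0 []) := by
      unfold cRowS
      apply List.map_congr_left
      intro x hx
      rw [pvWin_eq_fA prev width x (List.mem_range.mp hx) hw hlen]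
    rw [hmap]
    rw [ih (y0+1) (acc ++ [cRowS width prev (P.getD y0 [])]) (cRowS width prev (P.getD y0 []))
      (by omega) (by omega) List.getLast?_concat (by simp [cRowS])]
    have hPdrop : P.drop y0 = P.getD y0 [] :: P.drop (y0+1) := by
      rw [List.drop_eq_getElem_cons hy0P, List.getD_eq_getElem?_getD,
        List.getElem?_eq_getElem hy0P]
      simp
    rw [hPdrop]
    simp [specRows, List.append_assoc]

-- reading the finished cost grid through drop
theorem getD_drop (l : List (List Int)) (n m : Nat) :
    (l.drop n).getD m [] = l.getD (n+m) [] := by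
  simp [List.getD_eq_getElem?_getD, List.getElem?_drop]

theorem foldBDir (P : List (List Int)) (width : Nat)
    (CG : List (List Int)) :
    ∀ (rs : List (List Int)) (y0 : Nat) (acc : List (List Int)) (prev : List Int),
      1 ≤ y0 → rs = P.drop y0 →
      CG.drop (y0-1) = prev :: (specRows width prev rs).1 →
      prev.length = width →
      (List.range' y0 rs.length).foldl
        (fun (dg : List (List Int)) y =>
          let prevr := CG.getD (y - 1) []
          let base := CG.getD y []
          let drow := (List.range width).foldl
            (fun (dr : List Int) x =>
              let m := base.getD x 0 - (P.getD y []).getD x 0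
              dr ++ [if 0 < x ∧ prevr.getD (x - 1) 0 = m then (1:Int)
                     else if prevr.getD x 0 = m then 2 else 3]) []
          dg ++ [drow]) acc
      = acc ++ (specRows width prev rs).2 := by
  intro rs
  induction rs with
  | nil =>
    intro y0 acc prev _ _ _ _
    simp [specRows]
  | cons row rs ih =>
    intro y0 acc prev hy0 hrs hdropCG hlen
    have hrow : row = P.getD y0 [] := by
      have hy0P : y0 < P.length := by
        by_contra h
        rw [List.drop_eq_nil_of_le (by omega)] at hrs
        exact List.cons_ne_nil _ _ hrs
      have : P.drop y0 = P.getD y0 [] :: P.drop (y0+1) := by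
        rw [List.drop_eq_getElem_cons hy0P, List.getD_eq_getElem?_getD,
          List.getElem?_eq_getElem hy0P]
        simp
      rw [this] at hrs
      exact (List.cons.injEq _ _ _ _ ▸ hrs).1
    have hrs' : rs = P.drop (y0+1) := by
      have hy0P : y0 < P.length := by
        by_contra h
        rw [List.drop_eq_nil_of_le (by omega)] at hrs
        exact List.cons_ne_nil _ _ hrs
      have : P.drop y0 = P.getD y0 [] :: P.drop (y0+1) := by
        rw [List.drop_eq_getElem_cons hy0P, List.getD_eq_getElem?_getD,
          List.getElem?_eq_getElem hy0P]
        simp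
      rw [this] at hrs
      exact (List.cons.injEq _ _ _ _ ▸ hrs).2
    -- the two rows B reads from the finished cost grid
    have hprev : CG.getD (y0-1) [] = prev := by
      have := getD_drop CG (y0-1) 0
      rw [hdropCG] at this
      simpa using this.symm
    have hbase : CG.getD y0 [] = cRowS width prev row := by
      have := getD_drop CG (y0-1) 1
      rw [hdropCG] at this
      have h1 : y0 - 1 + 1 = y0 := by omega
      rw [h1] at this
      rw [← this]
      simp [specRows]
    simp only [List.length_cons, List.range'_succ, List.foldl_cons]
    have hfold : (List.range width).foldl
        (fun (dr : List Int) x =>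
          dr ++ [if 0 < x ∧ (CG.getD (y0-1) []).getD (x - 1) 0
                      = (CG.getD y0 []).getD x 0 - (P.getD y0 []).getD x 0 then (1:Int)
                 else if (CG.getD (y0-1) []).getD x 0
                      = (CG.getD y0 []).getD x 0 - (P.getD y0 []).getD x 0 then 2 else 3]) []
        = dRowS width prev := by
      rw [PySem.List.foldl_append_singleton_eq_map]
      unfold dRowS
      apply List.map_congr_left
      intro x hx
      have hxw := List.mem_range.mp hx
      rw [hprev, hbase]
      have hbx : (cRowS width prev row).getD x 0
          = row.getD x 0 + (fA prev width x).2 := by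
        unfold cRowS
        exact PySem.List.getD_map_range _ _ _ _ hxw
      rw [hbx, ← hrow]
      have hm : row.getD x 0 + (fA prev width x).2 - row.getD x 0 = (fA prev width x).2 := by
        ring
      rw [hm]
      exact dirTest_eq_fA prev width x hxw
    rw [hfold]
    rw [ih (y0+1) (acc ++ [dRowS width prev]) (cRowS width prev row)
      (by omega) hrs'
      (by
        have : CG.drop y0 = (CG.drop (y0-1)).tail := by
          rw [List.tail_drop]
          congr 1
          omega
        rw [show y0 + 1 - 1 = y0 by omega, this, hdropCG]
        simp [specRows])
      (by simp [cRowS])]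
    simp [specRows, List.append_assoc]

-- (range l.length).map (l.getD · 0) = l
theorem map_getD_range (l : List Int) :
    (List.range l.length).map (fun x => l.getD x 0) = l := by
  apply List.ext_getElem
  · simp
  · intro i h1 h2
    simp [List.getD_eq_getElem?_getD, List.getElem?_eq_getElem h2]

-- ===== VERDICT (by name: the statement is the Claim_ definition above) =====
theorem seam_search_vertical_spec : Claim_equal_seam_search_vertical := by
  intro P hdom hpre
  obtain ⟨hne, hrows, hwid⟩ := hpre
  unfold Spec_seam_search_vertical
  obtain ⟨p0, rest, rfl⟩ : ∃ p0 rest, P = p0 :: rest := by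
    cases P with
    | nil => exact absurd rfl hne
    | cons a l => exact ⟨a, l, rfl⟩
  unfold seam_search_vertical seam_search_vertical_alt
  simp only [List.getD_cons_zero, List.length_cons, Nat.add_sub_cancel]
  have hzlen : 0 < (List.replicate (rest.length + 1) (List.replicate p0.length (0:Int))).length := by
    simp
  have hz0 : (List.replicate (rest.length + 1) (List.replicate p0.length (0:Int))).getD 0 []
      = List.replicate p0.length (0:Int) := by
    simp [List.replicate_succ]
  have hpf := pairFold 0
    (fun _ x => pvGet2 (p0 :: rest) 0 x) (fun _ _ => (0:Int))
    (fun _ _ _ => rfl) (fun _ _ _ => rfl)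
    p0.length
    (List.replicate (rest.length + 1) (List.replicate p0.length (0:Int)))
    (List.replicate (rest.length + 1) (List.replicate p0.length (0:Int)))
    hzlen hzlen (by rw [hz0]; simp) (by rw [hz0]; simp)
  rw [hpf]
  rw [hz0]
  have hmap1 : (List.range p0.length).map (fun x => pvGet2 (p0 :: rest) 0 x) = p0 := by
    have : (fun x => pvGet2 (p0 :: rest) 0 x) = (fun x => p0.getD x 0) := by
      funext x
      simp [pvGet2]
    rw [this, map_getD_range]
  have hmap0 : (List.range p0.length).map (fun _ => (0:Int)) = List.replicate p0.length 0 := by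
    rw [List.map_const']
    simp
  rw [hmap1, hmap0]
  have hset : ∀ (r : List Int),
      (List.replicate (rest.length + 1) (List.replicate p0.length (0:Int))).set 0
        (r ++ (List.replicate p0.length (0:Int)).drop p0.length)
      = r :: List.replicate rest.length (List.replicate p0.length (0:Int)) := by
    intro r
    simp [List.replicate_succ]
  rw [hset, hset]
  rcases hwid with hone | hw
  · have : rest = [] := by
      simp only [List.length_cons] at hone
      exact List.eq_nil_of_length_eq_zero (by omega)
    subst this
    simp
  · simp only [List.headD_cons] at hw
    rw [outerA (p0 :: rest) p0.length rest.length 1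
      (p0 :: List.replicate rest.length (List.replicate p0.length 0))
      (List.replicate p0.length 0 :: List.replicate rest.length (List.replicate p0.length 0))
      (by omega) (by simp; omega) (by simp) (by simp)
      (by
        intro j hj hjP
        obtain ⟨j', rfl⟩ : ∃ j', j = j' + 1 := ⟨j - 1, by omega⟩
        simp only [List.getD_cons_succ]
        simp only [List.length_cons] at hjP
        simp [List.getD_eq_getElem?_getD, (show j' < rest.length by omega)])
      (by
        intro j hj hjP
        obtain ⟨j', rfl⟩ : ∃ j', j = j' + 1 := ⟨j - 1, by omega⟩
        simp only [List.getD_cons_succ]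
        simp only [List.length_cons] at hjP
        simp [List.getD_eq_getElem?_getD, (show j' < rest.length by omega)])]
    rw [foldBCost (p0 :: rest) p0.length hw rest.length 1 [p0] p0 (by omega)
      (by simp; omega) rfl rfl]
    have hrestlen : rest.length = (List.drop 1 (p0 :: rest)).length := by simp
    rw [show List.drop 1 (p0 :: rest) = rest from rfl] at *
    rw [hrestlen]
    rw [foldBDir (p0 :: rest) p0.length
      ([p0] ++ (specRows p0.length p0 rest).1) rest 1
      [List.replicate p0.length 0] p0 (by omega) rfl (by simp) rfl]
    simp
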